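-- pv_equiv track=rewrite | github.com/about-joo91/algorithm | 재귀/boj-2448.py | make_triangle
-- ===== SOURCE A (Python) =====
-- def make_triangle(n):
--     if n == 3:
--         return ["  *  ", " * * ", "*****"]
--
--     stars = make_triangle(n//2)
--     cur_stars = []
--
--     for star in stars:
--         cur_stars.append(" "* (n//2) + star + " " * (n//2))
--
--     for star in stars:
--         cur_stars.append(star + " " + star)
--
--     return cur_stars
-- ===== SOURCE B (Python) =====
-- def make_triangle(n):
--     chain = []
--     m = n
--     while m > 3:
--         chain.append(m)
--         m //= 2
--     if m != 3:
--         raise ValueError("n must halve down to exactly 3 (n = 3*2^k .. 4*2^k - 1)")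
--     cur = ["  *  ", " * * ", "*****"]
--     for m in reversed(chain):
--         half = m // 2
--         cur = [" " * half + s + " " * half for s in cur] + [s + " " + s for s in cur]
--     return cur
-- ===== Notes on version B (the rewrite author's own statement) =====
-- stated objective: simpler
-- what changed: Replaces A's top-down recursion by an iterative version: collect the halving chain n, n//2, ... down to the base size 3 (raising ValueError instead of A's RecursionError if the chain misses 3), then build the figure bottom-up in one loop over the reversed chain.
import Mathlib
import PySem

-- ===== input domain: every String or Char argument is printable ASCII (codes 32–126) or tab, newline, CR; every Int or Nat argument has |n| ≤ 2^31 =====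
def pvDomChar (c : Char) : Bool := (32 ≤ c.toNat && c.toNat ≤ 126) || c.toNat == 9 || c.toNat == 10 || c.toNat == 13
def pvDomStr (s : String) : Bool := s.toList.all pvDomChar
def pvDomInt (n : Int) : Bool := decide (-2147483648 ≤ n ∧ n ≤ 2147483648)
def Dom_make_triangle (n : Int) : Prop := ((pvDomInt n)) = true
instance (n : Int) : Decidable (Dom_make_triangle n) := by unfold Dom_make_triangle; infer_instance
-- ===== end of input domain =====

-- B replaces A's top-down recursion by an iterative build: collect the halving chain, validate it, then one bottom-up loop (objective: simpler).

-- Python " " * i for an Int i (empty string when i ≤ 0, exactly Python's str*int); by hand.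
def pvSpaces (i : Int) : String := String.ofList (List.replicate i.toNat ' ')

-- ===== PORT A =====
-- A recurses on n//2 with no structural measure (it diverges/raises when the chain misses 3), so
-- the transliteration carries a fuel counter; fuel 64 exceeds the recursion depth for every n in
-- Dom, and Pre_ admits exactly the inputs on which the Python A returns.
def make_triangle_fuel : Nat → Int → List String
  | 0, _ => []
  | fuel + 1, n =>
    if n = 3 then ["  *  ", " * * ", "*****"]
    else
      let stars := make_triangle_fuel fuel (PySem.Int.floordiv n 2)
      (stars.map (fun star => pvSpaces (PySem.Int.floordiv n 2) ++ star ++ pvSpaces (PySem.Int.floordiv n 2)))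
        ++ (stars.map (fun star => star ++ " " ++ star))

def make_triangle (n : Int) : List String := make_triangle_fuel 64 n

-- ===== PORT B =====
-- the 'while m > 3' chain loop of Source B, returning (chain, final m); fuel 64 exceeds the number
-- of halvings for every n in Dom.
def make_triangle_alt_chain : Nat → Int → List Int × Int
  | 0, m => ([], m)
  | fuel + 1, m =>
    if 3 < m then
      let rest := make_triangle_alt_chain fuel (PySem.Int.floordiv m 2)
      (m :: rest.1, rest.2)
    else ([], m)

-- the 'for m in reversed(chain)' loop of Source B
def make_triangle_alt_step (cur : List String) (m : Int) : List String :=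
  (cur.map (fun s => pvSpaces (PySem.Int.floordiv m 2) ++ s ++ pvSpaces (PySem.Int.floordiv m 2)))
    ++ (cur.map (fun s => s ++ " " ++ s))

def make_triangle_alt (n : Int) : List String :=
  let c := make_triangle_alt_chain 64 n
  -- Source B raises ValueError when the chain misses 3; the port returns [] there (outside Pre_)
  if c.2 = 3 then c.1.reverse.foldl make_triangle_alt_step ["  *  ", " * * ", "*****"]
  else []

-- ===== PRECONDITION & SPEC =====
-- Pre_ excludes exactly the n whose halving chain n, n//2, ... misses 3, i.e. n outside every
-- interval [3·2^k, 4·2^k): there the Python A never reaches its base case and raises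
-- RecursionError, returning no value. (The conjunct k ≤ Nat.log2 n.natAbs is vacuous — 3·2^k ≤ n
-- already forces 2^k ≤ n — and only makes the existential decidable and quick to evaluate.)
def Pre_make_triangle (n : Int) : Prop := ∃ k : Nat, k ≤ Nat.log2 n.natAbs ∧ 3 * 2 ^ k ≤ n ∧ n < 4 * 2 ^ k
instance (n : Int) : Decidable (Pre_make_triangle n) := by unfold Pre_make_triangle; infer_instance
def pvWitness_make_triangle : Int := (13)

def Spec_make_triangle (n : Int) (out : List String) : Prop := out = make_triangle_alt n
instance (n : Int) (out : List String) : Decidable (Spec_make_triangle n out) := by unfold Spec_make_triangle; infer_instance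

-- ===== CLAIM (what is proved, stated in full; the proofs are below) =====
def Claim_equal_make_triangle : Prop := ∀ (n : Int), Dom_make_triangle n → Pre_make_triangle n → Spec_make_triangle n (make_triangle n)

-- ===== LEMMAS AND PROOFS =====

theorem pvFloordiv_bounds {k : Nat} {n : Int} (h1 : 3 * 2 ^ (k + 1) ≤ n) (h2 : n < 4 * 2 ^ (k + 1)) :
    3 * 2 ^ k ≤ PySem.Int.floordiv n 2 ∧ PySem.Int.floordiv n 2 < 4 * 2 ^ k := by
  have hn : 0 ≤ n := le_trans (by positivity) h1
  have he : PySem.Int.floordiv n 2 = n / 2 := by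
    simp only [PySem.Int.floordiv]; exact Int.fdiv_eq_ediv_of_nonneg n (by norm_num)
  have hp : (2 : Int) ^ (k + 1) = 2 * 2 ^ k := by ring
  rw [he]
  omega

theorem pvMain (k : Nat) : ∀ (fA fC : Nat) (n : Int), k < fA → k ≤ fC →
    3 * 2 ^ k ≤ n → n < 4 * 2 ^ k →
    (make_triangle_alt_chain fC n).2 = 3 ∧
    make_triangle_fuel fA n =
      (make_triangle_alt_chain fC n).1.reverse.foldl make_triangle_alt_step ["  *  ", " * * ", "*****"] := by
  induction k with
  | zero =>
    intro fA fC n hfA _ h1 h2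
    have hn : n = 3 := by omega
    obtain ⟨f, rfl⟩ := Nat.exists_eq_succ_of_ne_zero (Nat.pos_iff_ne_zero.mp hfA)
    subst hn
    cases fC <;> simp [make_triangle_fuel, make_triangle_alt_chain]
  | succ k ih =>
    intro fA fC n hfA hfC h1 h2
    obtain ⟨f, rfl⟩ := Nat.exists_eq_succ_of_ne_zero (Nat.pos_iff_ne_zero.mp (Nat.lt_of_le_of_lt (Nat.zero_le _) hfA))
    obtain ⟨c, rfl⟩ := Nat.exists_eq_succ_of_ne_zero (Nat.pos_iff_ne_zero.mp (Nat.lt_of_lt_of_le (Nat.succ_pos k) hfC))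
    have hp : (2 : Int) ^ (k + 1) = 2 * 2 ^ k := by ring
    have hpk : (1 : Int) ≤ 2 ^ k := one_le_pow₀ (by norm_num)
    have hne : n ≠ 3 := by omega
    have hgt : 3 < n := by omega
    obtain ⟨hb1, hb2⟩ := pvFloordiv_bounds h1 h2
    obtain ⟨hrec2, hrec1⟩ := ih f c (PySem.Int.floordiv n 2) (by omega) (by omega) hb1 hb2
    refine ⟨?_, ?_⟩
    · simp only [make_triangle_alt_chain, if_pos hgt]; exact hrec2
    · simp only [make_triangle_fuel, if_neg hne, make_triangle_alt_chain, if_pos hgt,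
        List.reverse_cons, List.foldl_append, List.foldl_cons, List.foldl_nil, hrec1,
        make_triangle_alt_step]

-- inside Dom (n ≤ 2^31), the k of Pre_ is below 32, so fuel 64 suffices
theorem pvK_small {k : Nat} {n : Int} (hd : Dom_make_triangle n) (h1 : 3 * 2 ^ k ≤ n) : k < 32 := by
  by_contra h
  have h32 : (2 : Int) ^ 32 ≤ 2 ^ k := pow_le_pow_right₀ (by norm_num) (by omega)
  have hn : n ≤ 2147483648 := by
    have hd' : pvDomInt n = true := hd
    simp only [pvDomInt, decide_eq_true_eq] at hd'
    exact hd'.2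
  have : (2 : Int) ^ 32 = 4294967296 := by norm_num
  omega

-- ===== VERDICT (by name: the statement is the Claim_ definition above) =====
theorem make_triangle_spec : Claim_equal_make_triangle := by
  intro n hd hpre
  obtain ⟨k, _, h1, h2⟩ := hpre
  have hk : k < 32 := pvK_small hd h1
  unfold Spec_make_triangle make_triangle make_triangle_alt
  obtain ⟨h3, heq⟩ := pvMain k 64 64 n (by omega) (by omega) h1 h2
  simp [h3, heq]
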